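-- pv_equiv track=rewrite | github.com/Aasthaengg/IBMdataset | Python_codes/p03069/s705883500.py | solve
-- ===== SOURCE A (Python) =====
-- def solve(N, S):
--     W = [0] * (N+1)  # W[j]-W[i]: 区間[i, j)の白の数
--     B = [0] * (N+1)  # B[j]-B[i]: 区間[i, j)の黒の数
--     for i in range(N):
--         s = S[i]
--         W[i+1] = W[i] + 1 if s == "." else W[i]
--         B[i+1] = B[i] + 1 if s == "#" else B[i]
--     # i以上を黒に、i未満を白にする
--     # .....##### になればOK
--     ans = N
--     for i in range(N+1):
--         b2w = W[N] - W[i]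
--         w2b = B[i] - B[0]
--         ans = min(ans, b2w + w2b)
--     return ans
-- ===== SOURCE B (Python) =====
-- def solve(N, S):
--     # one pass, O(1) space: w = flips to whiten the prefix seen so far,
--     # b = min flips for a white*black* prefix ending in black;
--     # the answer starts at the trivial bound N (repaint every character).
--     w = b = 0
--     for i in range(N):
--         c = S[i]
--         nb = min(w, b) + (1 if c == "." else 0)
--         w += 1 if c == "#" else 0
--         b = nb
--     return min(N, w, b)
-- ===== Notes on version B (the rewrite author's own statement) =====
-- stated objective: faster
-- what changed: Replaces the two prefix-sum arrays plus a second scan over all N+1 split points by a single pass that keeps only two integers (w = cost to whiten the prefix seen so far, b = min cost of a white*black* prefix ending in black), returning min(N, w, b).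
import Mathlib
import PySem

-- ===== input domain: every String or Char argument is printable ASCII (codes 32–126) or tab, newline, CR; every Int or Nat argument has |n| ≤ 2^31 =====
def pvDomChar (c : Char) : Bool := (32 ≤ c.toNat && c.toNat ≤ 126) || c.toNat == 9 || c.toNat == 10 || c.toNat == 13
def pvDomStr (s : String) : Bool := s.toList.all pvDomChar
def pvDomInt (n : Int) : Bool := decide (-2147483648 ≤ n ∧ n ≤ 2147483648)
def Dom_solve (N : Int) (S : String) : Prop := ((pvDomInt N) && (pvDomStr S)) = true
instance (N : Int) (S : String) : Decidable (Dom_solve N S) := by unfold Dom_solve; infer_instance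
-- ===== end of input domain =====

-- B replaces A's two prefix-sum arrays and split-point scan by a one-pass two-counter DP
-- returning min(N, w, b) (measured constant-factor speedup, O(1) extra space).

-- ===== PORT A =====
-- Python fills W[i+1]/B[i+1] from W[i]/B[i] sequentially into preallocated arrays; the port
-- builds the same prefix lists by appending (identical values at every index that is read).
-- Reads W[i]/B[i]/S[i] are in range under Pre_solve; the pyGetD default is never used there.
def buildStepA (cs : List Char) (p : List Int × List Int) (i : Int) : List Int × List Int :=
  let s := PySem.List.pyGetD cs i ' '
  let w := PySem.List.pyGetD p.1 i 0
  let b := PySem.List.pyGetD p.2 i 0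
  (p.1 ++ [if s = '.' then w + 1 else w], p.2 ++ [if s = '#' then b + 1 else b])

def ansStepA (WB : List Int × List Int) (N : Int) (ans : Int) (i : Int) : Int :=
  let b2w := PySem.List.pyGetD WB.1 N 0 - PySem.List.pyGetD WB.1 i 0
  let w2b := PySem.List.pyGetD WB.2 i 0 - PySem.List.pyGetD WB.2 0 0
  min ans (b2w + w2b)

def solve (N : Int) (S : String) : Int :=
  let WB := (PySem.List.pyRange 0 N 1).foldl (buildStepA S.toList) ([0], [0])
  (PySem.List.pyRange 0 (N + 1) 1).foldl (ansStepA WB N) N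

-- ===== PORT B =====
def dpStepB (cs : List Char) (p : Int × Int) (i : Int) : Int × Int :=
  let c := PySem.List.pyGetD cs i ' '
  let nb := min p.1 p.2 + (if c = '.' then 1 else 0)
  (p.1 + (if c = '#' then 1 else 0), nb)

def solve_alt (N : Int) (S : String) : Int :=
  let p := (PySem.List.pyRange 0 N 1).foldl (dpStepB S.toList) (0, 0)
  min N (min p.1 p.2)

-- ===== PRECONDITION & SPEC =====
-- Pre_solve excludes exactly the inputs where A raises IndexError (reading S[i] for i up to N-1
-- requires N ≤ len(S)); nothing else is excluded.
def Pre_solve (N : Int) (S : String) : Prop := N ≤ (S.toList.length : Int)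
instance (N : Int) (S : String) : Decidable (Pre_solve N S) := by unfold Pre_solve; infer_instance
def pvWitness_solve : Int × String := (4, ".##.")

def Spec_solve (N : Int) (S : String) (out : Int) : Prop := out = solve_alt N S
instance (N : Int) (S : String) (out : Int) : Decidable (Spec_solve N S out) := by unfold Spec_solve; infer_instance

-- ===== CLAIM (what is proved, stated in full; the proofs are below) =====
def Claim_equal_solve : Prop := ∀ (N : Int) (S : String), Dom_solve N S → Pre_solve N S → Spec_solve N S (solve N S)

-- ===== LEMMAS AND PROOFS =====

-- number of '.' / '#' in a char list, as Int
def cntD (t : List Char) : Int := (t.countP (fun c => c = '.') : Int)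
def cntH (t : List Char) : Int := (t.countP (fun c => c = '#') : Int)

-- B's loop body on a character (index-free form)
def stepB (p : Int × Int) (c : Char) : Int × Int :=
  (p.1 + (if c = '#' then 1 else 0), min p.1 p.2 + (if c = '.' then 1 else 0))

def phi (t : List Char) : Int × Int := t.foldl stepB (0, 0)

lemma cntD_nil : cntD [] = 0 := rfl
lemma cntH_nil : cntH [] = 0 := rfl

lemma cntD_append_singleton (t : List Char) (c : Char) :
    cntD (t ++ [c]) = cntD t + (if c = '.' then 1 else 0) := by
  by_cases h : c = '.' <;>
    simp [cntD, List.countP_append, h]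

lemma cntH_append_singleton (t : List Char) (c : Char) :
    cntH (t ++ [c]) = cntH t + (if c = '#' then 1 else 0) := by
  by_cases h : c = '#' <;>
    simp [cntH, List.countP_append, h]

lemma phi_fst_aux (t : List Char) : ∀ p : Int × Int, (t.foldl stepB p).1 = p.1 + cntH t := by
  induction t with
  | nil => intro p; simp [cntH_nil]
  | cons c t ih =>
    intro p
    have hc : cntH (c :: t) = (if c = '#' then 1 else 0) + cntH t := by
      by_cases h : c = '#'
      · simp [cntH, h]
        omega
      · simp [cntH, h]
    simp only [List.foldl_cons, ih, stepB, hc]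
    ring

lemma phi_fst (t : List Char) : (phi t).1 = cntH t := by
  simpa using phi_fst_aux t (0, 0)

lemma phi_append_singleton (t : List Char) (c : Char) :
    phi (t ++ [c]) = stepB (phi t) c := by
  simp [phi, List.foldl_append]

-- a fold of running minima over terms all shifted by k
lemma foldl_min_shift (g : Int → Int) (k : Int) :
    ∀ (l : List Int) (a : Int),
      l.foldl (fun x i => min x (g i + k)) a = l.foldl (fun x i => min x (g i)) (a - k) + k := by
  intro l
  induction l with
  | nil => intro a; simp
  | cons i l ih =>
    intro a
    simp only [List.foldl_cons]
    rw [ih (min a (g i + k))]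
    have h : min a (g i + k) - k = min (a - k) (g i) := by omega
    rw [h]

-- the cost of painting positions < i white and ≥ i black, for a fixed target t
def cost (t : List Char) (i : Int) : Int :=
  (cntD t - cntD (t.take i.toNat)) + cntH (t.take i.toNat)

-- A's answer loop computes min a (min over all split points) = min a (B's DP value)
lemma key (t : List Char) : ∀ a : Int,
    (PySem.List.pyRange 0 ((t.length : Int) + 1) 1).foldl (fun ans i => min ans (cost t i)) a
      = min a (min (phi t).1 (phi t).2) := by
  induction t using List.reverseRecOn with
  | nil =>
    intro a
    have h0 : PySem.List.pyRange 0 1 1 = [0] := by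
      simpa using PySem.List.pyRange_one_singleton 0
    simp [h0, cost, cntD_nil, cntH_nil, phi]
  | append_singleton t c ih =>
    intro a
    have hlen : ((t ++ [c]).length : Int) = (t.length : Int) + 1 := by simp
    have hsplit : PySem.List.pyRange 0 ((t.length : Int) + 1 + 1) 1
        = PySem.List.pyRange 0 ((t.length : Int) + 1) 1 ++ [(t.length : Int) + 1] := by
      exact PySem.List.pyRange_one_succ_right (by positivity)
    -- on indices i ≤ t.length the cost on t ++ [c] is the cost on t shifted by the '.'-indicator
    have hcong : ∀ (acc : Int), ∀ i ∈ PySem.List.pyRange 0 ((t.length : Int) + 1) 1,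
        min acc (cost (t ++ [c]) i) = min acc (cost t i + (if c = '.' then 1 else 0)) := by
      intro acc i hi
      rw [PySem.List.mem_pyRange_one] at hi
      have hle : i.toNat ≤ t.length := by omega
      have h1 : (t ++ [c]).take i.toNat = t.take i.toNat := List.take_append_of_le_length hle
      simp only [cost, h1, cntD_append_singleton]
      omega
    have hfull : (t ++ [c]).take ((t.length : Int) + 1).toNat = t ++ [c] := by
      apply List.take_of_length_le
      simp
    have hlast : cost (t ++ [c]) ((t.length : Int) + 1) = cntH t + (if c = '#' then 1 else 0) := by
      rw [cost, hfull, cntH_append_singleton]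
      omega
    rw [hlen, hsplit, List.foldl_append]
    rw [PySem.List.foldl_congr_mem _ _ _ _ hcong]
    rw [foldl_min_shift (fun i => cost t i) (if c = '.' then 1 else 0)]
    rw [ih (a - (if c = '.' then 1 else 0))]
    simp only [List.foldl_cons, List.foldl_nil, hlast]
    rw [phi_append_singleton]
    simp only [stepB, phi_fst]
    omega

-- A's first loop builds exactly the prefix-count tables
lemma buildWB (cs : List Char) : ∀ (k : Nat), k ≤ cs.length →
    (PySem.List.pyRange 0 (k : Int) 1).foldl (buildStepA cs) ([0], [0])
    = ((List.range (k + 1)).map (fun i => cntD (cs.take i)),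
       (List.range (k + 1)).map (fun i => cntH (cs.take i))) := by
  intro k
  induction k with
  | zero => intro _; simp [cntD_nil, cntH_nil]
  | succ k ih =>
    intro hk
    have hk' : k ≤ cs.length := by omega
    have hcast : (((k : Nat) + 1 : Nat) : Int) = ((k : Nat) : Int) + 1 := by push_cast; ring
    have hstep : PySem.List.pyRange 0 ((k : Int) + 1) 1
        = PySem.List.pyRange 0 (k : Int) 1 ++ [(k : Int)] := by
      exact PySem.List.pyRange_one_succ_right (by positivity)
    rw [hcast, hstep, List.foldl_append, ih hk']
    simp only [List.foldl_cons, List.foldl_nil]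
    have hklt : k < cs.length := by omega
    have hs : PySem.List.pyGetD cs (k : Int) ' ' = cs[k]'hklt := by
      rw [PySem.List.pyGetD_natCast, List.getD_eq_getElem cs ' ' hklt]
    have hw : PySem.List.pyGetD ((List.range (k + 1)).map (fun i => cntD (cs.take i))) (k : Int) 0
        = cntD (cs.take k) := by
      rw [PySem.List.pyGetD_natCast, PySem.List.getD_map_range _ _ _ _ (by omega)]
    have hb : PySem.List.pyGetD ((List.range (k + 1)).map (fun i => cntH (cs.take i))) (k : Int) 0
        = cntH (cs.take k) := by
      rw [PySem.List.pyGetD_natCast, PySem.List.getD_map_range _ _ _ _ (by omega)]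
    have htake : cs.take (k + 1) = cs.take k ++ [cs[k]'hklt] := by
      rw [List.take_add_one]
      simp [List.getElem?_eq_getElem hklt]
    rw [buildStepA]
    simp only [hs, hw, hb]
    rw [Prod.mk.injEq]
    constructor
    · rw [List.range_succ (n := k + 1), List.map_append]
      congr 1
      simp only [List.map_cons, List.map_nil, htake, cntD_append_singleton]
      by_cases h : cs[k]'hklt = '.' <;> simp [h]
    · rw [List.range_succ (n := k + 1), List.map_append]
      congr 1
      simp only [List.map_cons, List.map_nil, htake, cntH_append_singleton]
      by_cases h : cs[k]'hklt = '#' <;> simp [h]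

-- B's index loop is the fold of stepB over the first N characters
lemma solve_alt_eq (N : Int) (S : String) (h0 : 0 ≤ N) (h1 : N ≤ (S.toList.length : Int)) :
    solve_alt N S = min N (min (phi (S.toList.take N.toNat)).1 (phi (S.toList.take N.toNat)).2) := by
  have main : ∀ (k : Nat), k ≤ S.toList.length → ∀ (p : Int × Int),
      (PySem.List.pyRange 0 (k : Int) 1).foldl (dpStepB S.toList) p
      = (S.toList.take k).foldl stepB p := by
    intro k
    induction k with
    | zero => intro _ p; simp
    | succ k ih =>
      intro hk p
      have hk' : k ≤ S.toList.length := by omega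
      have hklt : k < S.toList.length := by omega
      have hcast : (((k : Nat) + 1 : Nat) : Int) = ((k : Nat) : Int) + 1 := by push_cast; ring
      have hstep : PySem.List.pyRange 0 ((k : Int) + 1) 1
          = PySem.List.pyRange 0 (k : Int) 1 ++ [(k : Int)] := by
        exact PySem.List.pyRange_one_succ_right (by positivity)
      have htake : S.toList.take (k + 1) = S.toList.take k ++ [S.toList[k]'hklt] := by
        rw [List.take_add_one]
        simp [List.getElem?_eq_getElem hklt]
      rw [hcast, hstep, List.foldl_append, ih hk', htake, List.foldl_append]
      simp only [List.foldl_cons, List.foldl_nil]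
      rw [dpStepB, PySem.List.pyGetD_natCast, List.getD_eq_getElem S.toList ' ' hklt]
      rfl
  have hN : ((N.toNat : Nat) : Int) = N := Int.toNat_of_nonneg h0
  have hle : N.toNat ≤ S.toList.length := by omega
  simp only [solve_alt]
  rw [← hN, main N.toNat hle (0, 0), Int.toNat_natCast]
  rfl

lemma solve_eq (N : Int) (S : String) (h0 : 0 ≤ N) (h1 : N ≤ (S.toList.length : Int)) :
    solve N S = solve_alt N S := by
  have hN : ((N.toNat : Nat) : Int) = N := Int.toNat_of_nonneg h0
  have hle : N.toNat ≤ S.toList.length := by omega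
  have htlen : (S.toList.take N.toNat).length = N.toNat := by
    rw [List.length_take]
    omega
  simp only [solve]
  rw [← hN, buildWB S.toList N.toNat hle]
  have hcong : ∀ (acc : Int), ∀ i ∈ PySem.List.pyRange 0 (((N.toNat : Nat) : Int) + 1) 1,
      ansStepA ((List.range (N.toNat + 1)).map (fun i => cntD (S.toList.take i)),
                (List.range (N.toNat + 1)).map (fun i => cntH (S.toList.take i)))
          ((N.toNat : Nat) : Int) acc i
      = min acc (cost (S.toList.take N.toNat) i) := by
    intro acc i hi
    rw [PySem.List.mem_pyRange_one] at hi
    have hii : ((i.toNat : Nat) : Int) = i := Int.toNat_of_nonneg hi.1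
    have hilt : i.toNat < N.toNat + 1 := by omega
    have hWN : PySem.List.pyGetD ((List.range (N.toNat + 1)).map (fun i => cntD (S.toList.take i)))
        ((N.toNat : Nat) : Int) 0 = cntD (S.toList.take N.toNat) := by
      rw [PySem.List.pyGetD_natCast, PySem.List.getD_map_range _ _ _ _ (by omega)]
    have hB0 : PySem.List.pyGetD ((List.range (N.toNat + 1)).map (fun i => cntH (S.toList.take i)))
        (0 : Int) 0 = 0 := by
      rw [show (0 : Int) = ((0 : Nat) : Int) from rfl,
          PySem.List.pyGetD_natCast, PySem.List.getD_map_range _ _ _ _ (by omega)]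
      simp [cntH_nil]
    have hWi : PySem.List.pyGetD ((List.range (N.toNat + 1)).map (fun i => cntD (S.toList.take i))) i 0
        = cntD (S.toList.take i.toNat) := by
      rw [← hii, PySem.List.pyGetD_natCast, PySem.List.getD_map_range _ _ _ _ (by simpa using hilt),
          Int.toNat_natCast]
    have hBi : PySem.List.pyGetD ((List.range (N.toNat + 1)).map (fun i => cntH (S.toList.take i))) i 0
        = cntH (S.toList.take i.toNat) := by
      rw [← hii, PySem.List.pyGetD_natCast, PySem.List.getD_map_range _ _ _ _ (by simpa using hilt),
          Int.toNat_natCast]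
    have htt : (S.toList.take N.toNat).take i.toNat = S.toList.take i.toNat := by
      rw [List.take_take]
      congr 1
      omega
    rw [ansStepA]
    simp only [hWN, hB0, hWi, hBi, cost, htt]
    ring_nf
  rw [PySem.List.foldl_congr_mem _ _ _ _ hcong]
  have hkey := key (S.toList.take N.toNat) ((N.toNat : Nat) : Int)
  rw [htlen] at hkey
  rw [hkey, hN, solve_alt_eq N S h0 h1]

lemma solve_neg (N : Int) (S : String) (h : N < 0) : solve N S = N := by
  simp only [solve]
  rw [PySem.List.pyRange_one_eq_nil (show N + 1 ≤ 0 by omega)]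
  rfl

lemma solve_alt_neg (N : Int) (S : String) (h : N < 0) : solve_alt N S = N := by
  simp only [solve_alt]
  rw [PySem.List.pyRange_one_eq_nil (show N ≤ 0 by omega)]
  simp only [List.foldl_nil]
  omega

-- ===== VERDICT (by name: the statement is the Claim_ definition above) =====
theorem solve_spec : Claim_equal_solve := by
  intro N S _ hpre
  show solve N S = solve_alt N S
  by_cases h0 : 0 ≤ N
  · exact solve_eq N S h0 hpre
  · rw [solve_neg N S (by omega), solve_alt_neg N S (by omega)]
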